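-- pv_equiv track=rewrite | github.com/matsu7874/competitive-programming | atcoder/wupc2012/a.py | days_since_epoch
-- ===== SOURCE A (Python) =====
-- def days_since_epoch(year, month, day):
--     # 1年1月1日からの経過日数を求める
--     # days_since_epoch(1,1,1)=0
--     DAYS_IN_MONTH = [31, 28, 31, 30, 31, 30, 31, 31, 30, 31, 30, 31]
--     cnt = day - 1
--     for i in range(month - 1):
--         cnt += DAYS_IN_MONTH[i]
--     cnt += 365 * (year - 1)
--     if month <= 2:
--         y = year - 1
--     else:
--         y = year
--     cnt += y // 4
--     cnt -= y // 100
--     cnt += y // 400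
--     return cnt
-- ===== SOURCE B (Python) =====
-- def days_since_epoch(year, month, day):
--     # Closed-form proleptic Gregorian serial day number (no month table, no loop).
--     a = (14 - month) // 12
--     y = year - a
--     m = month + 12 * a - 3
--     return day - 1 + (153 * m + 2) // 5 + 365 * y + y // 4 - y // 100 + y // 400 - 306
-- ===== Notes on version B (the rewrite author's own statement) =====
-- stated objective: idiomatic
-- what changed: Replaces the month table and the per-month accumulation loop by the standard closed-form Gregorian serial-day formula (March-based year shift, (153*m+2)//5 month offset).
-- outside the precondition, e.g. on days_since_epoch(2000, 0, 5): A returns 730123, B returns 730092; on days_since_epoch(1, 14, 1): A raises IndexError, B returns 396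
import Mathlib
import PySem

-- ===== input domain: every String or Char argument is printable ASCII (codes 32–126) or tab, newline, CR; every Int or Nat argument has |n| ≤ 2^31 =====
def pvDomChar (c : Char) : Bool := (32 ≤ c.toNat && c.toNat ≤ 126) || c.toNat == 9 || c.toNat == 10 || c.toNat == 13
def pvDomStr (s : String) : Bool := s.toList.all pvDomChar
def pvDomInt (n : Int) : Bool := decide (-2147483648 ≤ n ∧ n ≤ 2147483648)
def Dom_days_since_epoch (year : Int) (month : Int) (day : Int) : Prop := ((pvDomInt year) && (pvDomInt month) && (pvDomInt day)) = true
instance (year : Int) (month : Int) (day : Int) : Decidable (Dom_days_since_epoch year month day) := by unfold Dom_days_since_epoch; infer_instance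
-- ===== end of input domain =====

-- B replaces A's month table and accumulation loop by the standard closed-form
-- Gregorian serial-day formula (idiomatic / O(1) in the month).

-- ===== PORT A =====
-- literal port of A; the pyGetD default 0 is never used inside Pre_ (month ≤ 13 keeps
-- every index in range; month ≥ 14 raises IndexError in Python and is excluded by Pre_)
def days_since_epoch (year : Int) (month : Int) (day : Int) : Int :=
  let DAYS_IN_MONTH : List Int := [31, 28, 31, 30, 31, 30, 31, 31, 30, 31, 30, 31]
  let cnt : Int := day - 1
  let cnt := (PySem.List.pyRange 0 (month - 1) 1).foldl
      (fun c i => c + PySem.List.pyGetD DAYS_IN_MONTH i 0) cnt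
  let cnt := cnt + 365 * (year - 1)
  let y : Int := if month ≤ 2 then year - 1 else year
  let cnt := cnt + PySem.Int.floordiv y 4
  let cnt := cnt - PySem.Int.floordiv y 100
  let cnt := cnt + PySem.Int.floordiv y 400
  cnt

-- ===== PORT B =====
def days_since_epoch_alt (year : Int) (month : Int) (day : Int) : Int :=
  let a : Int := PySem.Int.floordiv (14 - month) 12
  let y : Int := year - a
  let m : Int := month + 12 * a - 3
  day - 1 + PySem.Int.floordiv (153 * m + 2) 5 + 365 * y
    + PySem.Int.floordiv y 4 - PySem.Int.floordiv y 100 + PySem.Int.floordiv y 400 - 306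

-- ===== PRECONDITION & SPEC =====
-- Pre_ excludes month ≥ 14, where A raises IndexError (DAYS_IN_MONTH[12]), and the
-- non-date months month ≤ 0, an unspecified corner on which A's value (that of January
-- of the same year) and B's value (the proleptic continuation: month 0 = December of
-- the previous year) are equally defensible extensions and no caller would rely on either.
def Pre_days_since_epoch (year : Int) (month : Int) (day : Int) : Prop := 1 ≤ month ∧ month ≤ 13
instance (year : Int) (month : Int) (day : Int) : Decidable (Pre_days_since_epoch year month day) := by unfold Pre_days_since_epoch; infer_instance
def pvWitness_days_since_epoch : Int × Int × Int := (2024, 5, 17)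

def Spec_days_since_epoch (year : Int) (month : Int) (day : Int) (out : Int) : Prop := out = days_since_epoch_alt year month day
instance (year : Int) (month : Int) (day : Int) (out : Int) : Decidable (Spec_days_since_epoch year month day out) := by unfold Spec_days_since_epoch; infer_instance

-- ===== CLAIM (what is proved, stated in full; the proofs are below) =====
def Claim_equal_days_since_epoch : Prop := ∀ (year : Int) (month : Int) (day : Int), Dom_days_since_epoch year month day → Pre_days_since_epoch year month day → Spec_days_since_epoch year month day (days_since_epoch year month day)

-- ===== LEMMAS AND PROOFS =====
theorem fd12 (a : Int) : PySem.Int.floordiv a 12 = a / 12 := PySem.Int.floordiv_eq_ediv_of_pos (by norm_num)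
theorem fd5 (a : Int) : PySem.Int.floordiv a 5 = a / 5 := PySem.Int.floordiv_eq_ediv_of_pos (by norm_num)
theorem fd4 (a : Int) : PySem.Int.floordiv a 4 = a / 4 := PySem.Int.floordiv_eq_ediv_of_pos (by norm_num)
theorem fd100 (a : Int) : PySem.Int.floordiv a 100 = a / 100 := PySem.Int.floordiv_eq_ediv_of_pos (by norm_num)
theorem fd400 (a : Int) : PySem.Int.floordiv a 400 = a / 400 := PySem.Int.floordiv_eq_ediv_of_pos (by norm_num)

-- ===== VERDICT (by name: the statement is the Claim_ definition above) =====
theorem days_since_epoch_spec : Claim_equal_days_since_epoch := by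
  intro year month day _ hpre
  unfold Pre_days_since_epoch at hpre
  unfold Spec_days_since_epoch
  obtain ⟨h1, h2⟩ := hpre
  interval_cases month <;>
    · simp only [days_since_epoch, days_since_epoch_alt, fd12, fd5, fd4, fd100, fd400]
      rw [PySem.List.foldl_add]
      norm_num [PySem.List.pyRange, PySem.List.pyGetD, PySem.List.pyGet?,
        PySem.List.pyIdx?, Int.toNat, List.range_succ]
      omega
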